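-- pv_equiv track=rewrite | github.com/foundaway98/coding_test | 프로그래머스/lv1/82612. 부족한 금액 계산하기/부족한 금액 계산하기.py | solution
-- ===== SOURCE A (Python) =====
-- def solution(price, money, count):
--     cost = 0
--     for i in range(1,count+1):
--         cost += price*i
--     answer = money - cost
--     if answer < 0:
--         return answer * -1
--     else:
--         return 0
-- ===== SOURCE B (Python) =====
-- def solution(price, money, count):
--     m = count if count > 0 else 0
--     cost = price * m * (m + 1) // 2
--     shortfall = cost - money
--     return shortfall if shortfall > 0 else 0
-- ===== Notes on version B (the rewrite author's own statement) =====
-- stated objective: faster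
-- what changed: Replaces the O(count) accumulation loop with the closed-form arithmetic-series formula price*count*(count+1)//2.
import Mathlib
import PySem

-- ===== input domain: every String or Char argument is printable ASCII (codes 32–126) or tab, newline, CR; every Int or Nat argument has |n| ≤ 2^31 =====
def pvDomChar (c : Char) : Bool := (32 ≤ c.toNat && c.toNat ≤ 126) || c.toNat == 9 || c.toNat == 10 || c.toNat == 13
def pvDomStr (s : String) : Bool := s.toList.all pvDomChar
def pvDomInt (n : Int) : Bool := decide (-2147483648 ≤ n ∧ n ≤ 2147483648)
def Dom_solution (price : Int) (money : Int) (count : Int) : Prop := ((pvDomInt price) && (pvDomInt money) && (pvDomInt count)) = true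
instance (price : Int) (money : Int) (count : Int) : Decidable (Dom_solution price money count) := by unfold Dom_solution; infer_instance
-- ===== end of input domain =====

-- B replaces A's O(count) accumulation loop by the closed-form arithmetic-series formula (faster, asymptotic).


-- ===== PORT A =====
def solution (price : Int) (money : Int) (count : Int) : Int :=
  let cost := (PySem.List.pyRange 1 (count + 1) 1).foldl (fun c i => c + price * i) 0
  let answer := money - cost
  if answer < 0 then answer * -1 else 0

-- ===== PORT B =====
def solution_alt (price : Int) (money : Int) (count : Int) : Int :=
  let m := if count > 0 then count else 0
  let cost := PySem.Int.floordiv (price * m * (m + 1)) 2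
  let shortfall := cost - money
  if shortfall > 0 then shortfall else 0

-- ===== PRECONDITION & SPEC =====
def Spec_solution (price : Int) (money : Int) (count : Int) (out : Int) : Prop := out = solution_alt price money count
instance (price : Int) (money : Int) (count : Int) (out : Int) : Decidable (Spec_solution price money count out) := by unfold Spec_solution; infer_instance

-- ===== CLAIM (what is proved, stated in full; the proofs are below) =====
def Claim_equal_solution : Prop := ∀ (price : Int) (money : Int) (count : Int), Dom_solution price money count → Spec_solution price money count (solution price money count)

-- ===== LEMMAS AND PROOFS =====

/-- Twice the loop's accumulated cost is `price * n * (n+1)`. -/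
theorem pv_two_mul_cost (price : Int) : ∀ n : Nat,
    2 * (PySem.List.pyRange 1 ((n : Int) + 1) 1).foldl (fun c i => c + price * i) 0
      = price * n * (n + 1) := by
  intro n
  induction n with
  | zero => simp [PySem.List.pyRange_one_eq_nil]
  | succ k ih =>
      have h : PySem.List.pyRange 1 ((k : Int) + 1 + 1) 1
          = PySem.List.pyRange 1 ((k : Int) + 1) 1 ++ [(k : Int) + 1] :=
        PySem.List.pyRange_one_succ_right (by omega)
      push_cast
      push_cast at ih
      rw [h, List.foldl_append]
      simp only [List.foldl]
      ring_nf
      ring_nf at ih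
      omega

theorem pv_cost_eq (price count : Int) :
    (PySem.List.pyRange 1 (count + 1) 1).foldl (fun c i => c + price * i) 0
      = PySem.Int.floordiv (price * (if count > 0 then count else 0)
          * ((if count > 0 then count else 0) + 1)) 2 := by
  by_cases hc : count > 0
  · simp only [if_pos hc]
    obtain ⟨n, rfl⟩ : ∃ n : Nat, count = (n : Int) :=
      ⟨count.toNat, (Int.toNat_of_nonneg (le_of_lt hc)).symm⟩
    have h2 := pv_two_mul_cost price n
    rw [PySem.Int.floordiv_eq_ediv_of_pos (by norm_num), ← h2]
    omega
  · simp only [if_neg hc]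
    rw [PySem.List.pyRange_one_eq_nil (by omega)]
    simp [PySem.Int.floordiv]

-- ===== VERDICT (by name: the statement is the Claim_ definition above) =====
theorem solution_spec : Claim_equal_solution := by
  intro price money count _
  unfold Spec_solution solution solution_alt
  dsimp only
  rw [pv_cost_eq price count]
  set c := PySem.Int.floordiv (price * (if count > 0 then count else 0)
      * ((if count > 0 then count else 0) + 1)) 2 with hc
  split_ifs <;> omega
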